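-- pv_equiv track=rewrite | github.com/notpestilence/commander-lambda | 3-3-lucky-triples/solution.py | solution
-- ===== SOURCE A (Python) =====
-- def solution(l):
--     c, trips = [0] * len(l), 0
--     for i in range(len(l)):
--         for j in range(i):
--             if (l[i] % l[j] == 0):
--                 c[i] += 1 # the number of previous integers that divides l[i]
--                 trips += c[j] # the number of previous integers that divides l[j]
--     return trips
-- ===== SOURCE B (Python) =====
-- def solution(l):
--     # middle-element formulation: each m contributes (#divisors before m) * (#multiples after m)
--     n = len(l)
--     left = [sum(1 for j in range(i) if l[i] % l[j] == 0) for i in range(n)]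
--     right = [sum(1 for k in range(m + 1, n) if l[k] % l[m] == 0) for m in range(n)]
--     return sum(a * b for a, b in zip(left, right))
-- ===== Notes on version B (the rewrite author's own statement) =====
-- stated objective: alternative
-- what changed: A maintains a running counter list c and accumulates trips += c[j] inside the pair loop; B instead computes, by two independent comprehensions, for each element the number of divisors before it and the number of multiples after it, and returns the sum of their pointwise products (middle-element formulation).
-- outside the precondition, e.g. on solution([0, 3]): A raises ZeroDivisionError, B raises ZeroDivisionError
import Mathlib
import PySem

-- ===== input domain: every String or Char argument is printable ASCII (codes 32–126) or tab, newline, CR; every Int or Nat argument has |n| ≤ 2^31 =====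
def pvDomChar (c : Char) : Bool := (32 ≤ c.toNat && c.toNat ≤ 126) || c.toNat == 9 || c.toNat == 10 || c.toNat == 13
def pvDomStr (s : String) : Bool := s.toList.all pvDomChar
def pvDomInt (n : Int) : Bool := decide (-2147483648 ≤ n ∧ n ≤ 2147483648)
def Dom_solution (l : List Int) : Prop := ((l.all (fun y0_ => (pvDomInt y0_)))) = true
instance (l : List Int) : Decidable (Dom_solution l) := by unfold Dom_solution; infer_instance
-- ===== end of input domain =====

-- B recomputes the answer as a sum over middle elements of (#divisors before)·(#multiples after),
-- built from two independent comprehensions, instead of A's running-counter accumulation.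

-- ===== PORT A =====
-- literal transliteration of A: state (c, trips); nested index loops; on each divisibility hit
-- c[i] += 1 and trips += c[j]
def solution (l : List Int) : Int :=
  (((PySem.List.pyRange 0 (PySem.List.len l) 1).foldl
    (fun (st : List Int × Int) i =>
      (PySem.List.pyRange 0 i 1).foldl
        (fun (st : List Int × Int) j =>
          if PySem.Int.mod (PySem.List.pyGetD l i 0) (PySem.List.pyGetD l j 0) = 0 then
            (PySem.List.pySetD st.1 i (PySem.List.pyGetD st.1 i 0 + 1),
             st.2 + PySem.List.pyGetD st.1 j 0)
          else st) st)
    (List.replicate l.length (0 : Int), (0 : Int))).2)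

-- ===== PORT B =====
-- literal transliteration of B: left/right comprehensions, then the sum of pointwise products over zip
def solution_alt (l : List Int) : Int :=
  let n := PySem.List.len l
  let left := (PySem.List.pyRange 0 n 1).map (fun i =>
    ((PySem.List.pyRange 0 i 1).map (fun j =>
      if PySem.Int.mod (PySem.List.pyGetD l i 0) (PySem.List.pyGetD l j 0) = 0 then (1 : Int) else 0)).sum)
  let right := (PySem.List.pyRange 0 n 1).map (fun m =>
    ((PySem.List.pyRange (m + 1) n 1).map (fun k =>
      if PySem.Int.mod (PySem.List.pyGetD l k 0) (PySem.List.pyGetD l m 0) = 0 then (1 : Int) else 0)).sum)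
  ((left.zip right).map (fun p => p.1 * p.2)).sum

-- ===== PRECONDITION & SPEC =====
-- Python A raises ZeroDivisionError exactly when some element other than the last is 0
-- (such an element is later used as the divisor in l[i] % l[j]); B raises there too.
def Pre_solution (l : List Int) : Prop := (0 : Int) ∉ l.dropLast
instance (l : List Int) : Decidable (Pre_solution l) := by unfold Pre_solution; infer_instance
def pvWitness_solution : List Int := [1, 2, 4, 8]

def Spec_solution (l : List Int) (out : Int) : Prop := out = solution_alt l
instance (l : List Int) (out : Int) : Decidable (Spec_solution l out) := by unfold Spec_solution; infer_instance

-- ===== CLAIM (what is proved, stated in full; the proofs are below) =====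
def Claim_equal_solution : Prop := ∀ (l : List Int), Dom_solution l → Pre_solution l → Spec_solution l (solution l)

-- ===== LEMMAS AND PROOFS =====

-- whether l[i] is a multiple of l[j] (the test both programs perform)
def pvHit (l : List Int) (j i : Nat) : Bool :=
  PySem.Int.mod (l.getD i 0) (l.getD j 0) == 0

-- number of divisors of l[i] strictly before position i
def pvL (l : List Int) (i : Nat) : Int :=
  ∑ j ∈ Finset.range i, (if pvHit l j i then (1 : Int) else 0)

-- number of multiples of l[m] strictly after position m (and below n)
def pvR (l : List Int) (n m : Nat) : Int :=
  ∑ k ∈ Finset.Ico (m + 1) n, (if pvHit l m k then (1 : Int) else 0)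

lemma sum_map_range_eq (f : Nat → Int) (n : Nat) :
    ((List.range n).map f).sum = ∑ i ∈ Finset.range n, f i := rfl

-- B's port computes ∑ m, pvL m · pvR m
lemma solution_alt_eq (l : List Int) :
    solution_alt l = ∑ m ∈ Finset.range l.length, pvL l m * pvR l l.length m := by
  unfold solution_alt
  simp only [PySem.List.len_eq, PySem.List.pyRange_zero_natCast, List.zip_map', List.map_map,
    Function.comp_def]
  rw [sum_map_range_eq]
  apply Finset.sum_congr rfl
  intro m hm
  congr 1
  · rw [sum_map_range_eq]
    unfold pvL
    apply Finset.sum_congr rfl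
    intro j hj
    simp [pvHit]
  · rw [PySem.List.pyRange_one, List.map_map, sum_map_range_eq]
    unfold pvR
    rw [Finset.sum_Ico_eq_sum_range]
    have hcast : ((l.length : Int) - ((m : Int) + 1)).toNat = l.length - (m + 1) := by omega
    rw [hcast]
    apply Finset.sum_congr rfl
    intro k hk
    have hc : ((m : Int) + 1 + (k : Int)) = ((m + 1 + k : Nat) : Int) := by push_cast; ring
    simp only [Function.comp_def, hc, PySem.List.pyGetD_natCast]
    simp [pvHit]

-- the divisor-count list A maintains, after the first i outer iterations
def pvC (l : List Int) (i : Nat) : List Int :=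
  (List.range l.length).map (fun m => if m < i then pvL l m else 0)

-- pvC with an arbitrary value at position i (the cell the inner loop is incrementing)
def pvC' (l : List Int) (i : Nat) (v : Int) : List Int :=
  (List.range l.length).map (fun m => if m < i then pvL l m else if m = i then v else 0)

lemma pvC'_zero (l : List Int) (i : Nat) : pvC' l i 0 = pvC l i := by
  apply List.ext_getElem (by simp [pvC', pvC])
  intro k h1 h2
  simp only [pvC', pvC, List.getElem_map, List.getElem_range]
  split_ifs <;> rfl

lemma pvC'_getD (l : List Int) (i k : Nat) (v : Int) (hk : k < l.length) :
    (pvC' l i v).getD k 0 = (if k < i then pvL l k else if k = i then v else 0) := by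
  simp [pvC', List.getD, hk]

lemma pvC'_set (l : List Int) (i : Nat) (v w : Int) :
    (pvC' l i v).set i w = pvC' l i w := by
  apply List.ext_getElem (by simp [pvC'])
  intro k h1 h2
  simp only [pvC', List.getElem_set, List.getElem_map, List.getElem_range]
  by_cases hki : i = k
  · subst hki; simp
  · simp only [hki, if_false]
    split_ifs <;> first | rfl | omega

lemma pvC_succ (l : List Int) (i : Nat) :
    (pvC l i).set i (pvL l i) = pvC l (i + 1) := by
  apply List.ext_getElem (by simp [pvC])
  intro k h1 h2
  simp only [pvC, List.getElem_set, List.getElem_map, List.getElem_range]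
  by_cases hki : i = k
  · subst hki; simp
  · simp only [hki, if_false]
    split_ifs <;> first | rfl | omega

-- inner-loop invariant: processing j = 0..m-1 (m ≤ i < n) adds the hit count to c[i]
-- and the hit elements' counters to trips
lemma pvInner (l : List Int) (i : Nat) (hi : i < l.length) (t v : Int) (m : Nat) (hm : m ≤ i) :
    (List.range m).foldl
      (fun (st : List Int × Int) (j : Nat) =>
        if PySem.Int.mod (PySem.List.pyGetD l (i : Int) 0) (PySem.List.pyGetD l (j : Int) 0) = 0 then
          (PySem.List.pySetD st.1 (i : Int) (PySem.List.pyGetD st.1 (i : Int) 0 + 1),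
           st.2 + PySem.List.pyGetD st.1 (j : Int) 0)
        else st) (pvC' l i v, t)
    = (pvC' l i (v + ∑ j ∈ Finset.range m, (if pvHit l j i then (1 : Int) else 0)),
       t + ∑ j ∈ Finset.range m, (if pvHit l j i then pvL l j else 0)) := by
  induction m with
  | zero => simp
  | succ m ih =>
    rw [List.range_succ, List.foldl_append, ih (by omega), List.foldl_cons, List.foldl_nil,
      Finset.sum_range_succ, Finset.sum_range_succ]
    simp only [PySem.List.pyGetD_natCast, PySem.List.pySetD_natCast]
    have hgi : (pvC' l i (v + ∑ j ∈ Finset.range m, (if pvHit l j i then (1:Int) else 0))).getD i 0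
        = v + ∑ j ∈ Finset.range m, (if pvHit l j i then (1:Int) else 0) := by
      rw [pvC'_getD l i i _ hi]; simp
    have hgm : (pvC' l i (v + ∑ j ∈ Finset.range m, (if pvHit l j i then (1:Int) else 0))).getD m 0
        = pvL l m := by
      rw [pvC'_getD l i m _ (by omega)]; simp [show m < i by omega]
    by_cases h : pvHit l m i
    · have h' : PySem.Int.mod (l.getD i 0) (l.getD m 0) = 0 := by simpa [pvHit] using h
      rw [if_pos h', hgi, hgm, pvC'_set]
      simp only [if_pos h, Prod.mk.injEq]
      constructor
      · congr 1; ring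
      · ring
    · have h' : ¬ PySem.Int.mod (l.getD i 0) (l.getD m 0) = 0 := by simpa [pvHit] using h
      rw [if_neg h']
      simp only [if_neg h, add_zero]

-- A's inner loop, as a function of the outer index i
def pvStep (l : List Int) (i : Nat) (st : List Int × Int) : List Int × Int :=
  (List.range i).foldl
    (fun (st : List Int × Int) (j : Nat) =>
      if PySem.Int.mod (PySem.List.pyGetD l (i : Int) 0) (PySem.List.pyGetD l (j : Int) 0) = 0 then
        (PySem.List.pySetD st.1 (i : Int) (PySem.List.pyGetD st.1 (i : Int) 0 + 1),
         st.2 + PySem.List.pyGetD st.1 (j : Int) 0)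
      else st) st

lemma pvStep_pvC (l : List Int) (i : Nat) (hi : i < l.length) (t : Int) :
    pvStep l i (pvC l i, t)
    = (pvC l (i + 1), t + ∑ j ∈ Finset.range i, (if pvHit l j i then pvL l j else 0)) := by
  unfold pvStep
  rw [← pvC'_zero, pvInner l i hi t 0 i le_rfl]
  rw [zero_add]
  congr 1
  rw [← pvC_succ, ← pvC'_zero, pvC'_set]
  unfold pvL
  rfl

lemma pvC_zero (l : List Int) : pvC l 0 = List.replicate l.length 0 := by
  simp [pvC, List.map_const']

-- outer-loop invariant
lemma pvOuter (l : List Int) (i : Nat) (hi : i ≤ l.length) :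
    ((List.range i).foldl (fun (st : List Int × Int) (k : Nat) => pvStep l k st)
      (List.replicate l.length (0 : Int), (0 : Int)))
    = (pvC l i, ∑ i' ∈ Finset.range i, ∑ j ∈ Finset.range i', (if pvHit l j i' then pvL l j else 0)) := by
  induction i with
  | zero => simp [pvC_zero]
  | succ i ih =>
    rw [List.range_succ, List.foldl_append, ih (by omega), List.foldl_cons, List.foldl_nil,
      pvStep_pvC l i (by omega), Finset.sum_range_succ]

-- A's port computes the sum over all (divisor j, multiple i) pairs of pvL j
lemma solution_eq (l : List Int) :
    solution l = ∑ i ∈ Finset.range l.length, ∑ j ∈ Finset.range i, (if pvHit l j i then pvL l j else 0) := by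
  unfold solution
  simp only [PySem.List.len_eq, PySem.List.pyRange_zero_natCast, List.foldl_map]
  show ((List.range l.length).foldl (fun (st : List Int × Int) (k : Nat) => pvStep l k st)
      (List.replicate l.length (0 : Int), (0 : Int))).2 = _
  rw [pvOuter l l.length le_rfl]

-- exchange of summation: sum over (divisor, multiple) pairs = sum over middle elements
lemma pvExchange (l : List Int) (n : Nat) :
    ∑ i ∈ Finset.range n, ∑ j ∈ Finset.range i, (if pvHit l j i then pvL l j else 0)
    = ∑ m ∈ Finset.range n, pvL l m * pvR l n m := by
  induction n with
  | zero => simp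
  | succ n ih =>
    rw [Finset.sum_range_succ, Finset.sum_range_succ, ih]
    have hlast : pvR l (n + 1) n = 0 := by simp [pvR]
    rw [hlast, mul_zero, add_zero]
    have hR : ∀ m ∈ Finset.range n, pvL l m * pvR l (n + 1) m
        = pvL l m * pvR l n m + (if pvHit l m n then pvL l m else 0) := by
      intro m hm
      have hmn : m + 1 ≤ n := Finset.mem_range.mp hm
      rw [pvR, Finset.sum_Ico_succ_top hmn, mul_add, mul_ite, mul_one, mul_zero]
      rfl
    rw [Finset.sum_congr rfl hR, Finset.sum_add_distrib]

-- ===== VERDICT (by name: the statement is the Claim_ definition above) =====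
theorem solution_spec : Claim_equal_solution := by
  intro l _ _
  unfold Spec_solution
  rw [solution_eq, solution_alt_eq, pvExchange]
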